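-- pv_equiv track=rewrite | github.com/larsklingsten/hackerakademi.dk_challenge_2026 | scripts/password_crack_pamela.py | has_n_consecutive_letters
-- ===== SOURCE A (Python) =====
-- def has_n_consecutive_letters(s, n):
--     count = 0
--     for c in s:
--         if c.isalpha():
--             count += 1
--             if count >= n:
--                 return True
--         else:
--             count = 0
--     return False
-- ===== SOURCE B (Python) =====
-- from itertools import groupby
--
-- def has_n_consecutive_letters(s, n):
--     return any(k and sum(1 for _ in g) >= n
--                for k, g in groupby(s, key=str.isalpha))
-- ===== Notes on version B (the rewrite author's own statement) =====
-- stated objective: idiomatic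
-- what changed: Replaces the manual running counter with itertools.groupby splitting the string into maximal runs by isalpha and checking whether some alphabetic run has length >= n.
import Mathlib
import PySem

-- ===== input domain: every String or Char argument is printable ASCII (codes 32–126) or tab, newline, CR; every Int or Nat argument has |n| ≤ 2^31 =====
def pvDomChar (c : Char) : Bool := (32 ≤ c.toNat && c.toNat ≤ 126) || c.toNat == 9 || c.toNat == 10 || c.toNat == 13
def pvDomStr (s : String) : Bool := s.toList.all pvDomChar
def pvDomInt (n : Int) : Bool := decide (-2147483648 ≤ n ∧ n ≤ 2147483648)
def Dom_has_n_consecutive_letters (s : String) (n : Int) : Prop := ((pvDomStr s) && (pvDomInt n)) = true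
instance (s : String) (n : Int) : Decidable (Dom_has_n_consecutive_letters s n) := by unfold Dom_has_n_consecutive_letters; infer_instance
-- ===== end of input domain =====

-- B replaces A's manual running counter with an itertools.groupby split into maximal
-- isalpha-runs, checking whether some alphabetic run has length >= n (idiomatic, same cost).

-- ===== PORT A =====
-- A's for-loop with the mutable `count` and the early `return True`.
def pvLoopA (n : Int) : List Char → Int → Bool
  | [], _ => false
  | c :: cs, count =>
    if PySem.Chars.isalpha c then
      if n ≤ count + 1 then true else pvLoopA n cs (count + 1)
    else
      pvLoopA n cs 0

def has_n_consecutive_letters (s : String) (n : Int) : Bool :=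
  pvLoopA n s.toList 0

-- ===== PORT B =====
-- itertools.groupby(s, key=str.isalpha), yielding each group's key and length.
def pvGroups : List Char → List (Bool × Nat)
  | [] => []
  | c :: cs =>
    match pvGroups cs with
    | (k, m) :: rest =>
      if PySem.Chars.isalpha c == k then (k, m + 1) :: rest
      else (PySem.Chars.isalpha c, 1) :: (k, m) :: rest
    | [] => [(PySem.Chars.isalpha c, 1)]

def has_n_consecutive_letters_alt (s : String) (n : Int) : Bool :=
  (pvGroups s.toList).any (fun g => g.1 && n ≤ (g.2 : Int))

-- ===== PRECONDITION & SPEC =====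
def Spec_has_n_consecutive_letters (s : String) (n : Int) (out : Bool) : Prop := out = has_n_consecutive_letters_alt s n
instance (s : String) (n : Int) (out : Bool) : Decidable (Spec_has_n_consecutive_letters s n out) := by unfold Spec_has_n_consecutive_letters; infer_instance

-- ===== CLAIM (what is proved, stated in full; the proofs are below) =====
def Claim_equal_has_n_consecutive_letters : Prop := ∀ (s : String) (n : Int), Dom_has_n_consecutive_letters s n → Spec_has_n_consecutive_letters s n (has_n_consecutive_letters s n)

-- ===== LEMMAS AND PROOFS =====

def pvAnyB (n : Int) (l : List (Bool × Nat)) : Bool :=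
  l.any (fun g => g.1 && n ≤ (g.2 : Int))

-- What A's loop computes, phrased on B's run decomposition: the current counter `count`
-- extends the leading alphabetic run (if any); the rest is B's plain scan.
def pvHead (n count : Int) : List (Bool × Nat) → Bool
  | (true, m) :: rest => if n ≤ count + (m : Int) then true else pvAnyB n rest
  | l => pvAnyB n l

lemma pvGroups_nil (cs : List Char) (h : pvGroups cs = []) : cs = [] := by
  cases cs with
  | nil => rfl
  | cons d ds =>
    exfalso
    simp only [pvGroups] at h
    cases hh : pvGroups ds with
    | nil => rw [hh] at h; simp at h
    | cons p rest =>
      obtain ⟨k, m⟩ := p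
      rw [hh] at h
      by_cases hk : PySem.Chars.isalpha d = k <;> simp [hk] at h

lemma pvLoop_eq (n : Int) (cs : List Char) : ∀ count : Int,
    pvLoopA n cs count = pvHead n count (pvGroups cs) := by
  induction cs with
  | nil => intro count; simp [pvLoopA, pvGroups, pvHead, pvAnyB]
  | cons c cs ih =>
    intro count
    cases hA : PySem.Chars.isalpha c with
    | true =>
      have lhs : pvLoopA n (c :: cs) count =
          (if n ≤ count + 1 then true else pvLoopA n cs (count + 1)) := by
        simp [pvLoopA, hA]
      cases h : pvGroups cs with
      | nil =>
        have hg : pvGroups (c :: cs) = [(true, 1)] := by simp [pvGroups, h, hA]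
        have hcs := ih (count + 1); rw [h] at hcs
        rw [lhs, hcs, hg]
        simp [pvHead, pvAnyB]
      | cons p rest =>
        obtain ⟨k, m⟩ := p
        have hcs := ih (count + 1); rw [h] at hcs
        cases k with
        | true =>
          have hg : pvGroups (c :: cs) = (true, m + 1) :: rest := by
            simp [pvGroups, h, hA]
          rw [lhs, hcs, hg]
          simp only [pvHead]
          split_ifs <;> first | rfl | (exfalso; push_cast at *; omega)
        | false =>
          have hg : pvGroups (c :: cs) = (true, 1) :: (false, m) :: rest := by
            simp [pvGroups, h, hA]
          rw [lhs, hcs, hg]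
          simp only [pvHead]
          norm_num
    | false =>
      have lhs : pvLoopA n (c :: cs) count = pvLoopA n cs 0 := by
        simp [pvLoopA, hA]
      cases h : pvGroups cs with
      | nil =>
        have := pvGroups_nil cs h
        subst this
        rw [lhs]
        simp [pvLoopA, pvGroups, hA, pvHead, pvAnyB]
      | cons p rest =>
        obtain ⟨k, m⟩ := p
        have hcs := ih 0; rw [h] at hcs
        cases k with
        | true =>
          have hg : pvGroups (c :: cs) = (false, 1) :: (true, m) :: rest := by
            simp [pvGroups, h, hA]
          rw [lhs, hcs, hg]
          by_cases hm : n ≤ (m : Int) <;> simp [pvHead, pvAnyB, hm]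
        | false =>
          have hg : pvGroups (c :: cs) = (false, m + 1) :: rest := by
            simp [pvGroups, h, hA]
          rw [lhs, hcs, hg]
          simp [pvHead, pvAnyB]

-- ===== VERDICT (by name: the statement is the Claim_ definition above) =====
theorem has_n_consecutive_letters_spec : Claim_equal_has_n_consecutive_letters := by
  intro s n _
  unfold Spec_has_n_consecutive_letters has_n_consecutive_letters has_n_consecutive_letters_alt
  rw [pvLoop_eq]
  cases h : pvGroups s.toList with
  | nil => simp [pvHead, pvAnyB]
  | cons p rest =>
    obtain ⟨k, m⟩ := p
    cases k with
    | true => by_cases hm : n ≤ (m : Int) <;> simp [pvHead, pvAnyB, hm]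
    | false => simp [pvHead, pvAnyB]
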